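-- pv_equiv track=rewrite | github.com/lucasjunior24/studies-in-python | exercises/hacker_rank/03_string/03_strong_password.py | minimumNumber
-- ===== SOURCE A (Python) =====
-- def minimumNumber(n, password):
--     # Return the minimum number of characters to make the password strong
--
--     numbers = "0123456789"
--     lower_case = "abcdefghijklmnopqrstuvwxyz"
--     upper_case = "ABCDEFGHIJKLMNOPQRSTUVWXYZ"
--     special_characters = "!@#$%^&*()-+"
--     result = {"numbers": 0, "lower_case": 0, "upper_case": 0, "special_characters": 0}
--
--     for p in password:
--         if p in numbers:
--             result["numbers"] += 1
--         if p in lower_case: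
--             result["lower_case"] += 1
--         if p in upper_case:
--             result["upper_case"] += 1
--         if p in special_characters:
--             result["special_characters"] += 1
--
--     count = 0
--
--     if result["numbers"] == 0:
--         count += 1
--     if result["lower_case"] == 0:
--         count += 1
--     if result["upper_case"] == 0:
--         count += 1
--     if result["special_characters"] == 0:
--         count += 1
--
--     is_big = n < 6
--
--     if count == 0 and is_big:
--         return 6 - n
--     elif count and is_big:
--         quantos_faltam = 6 - n
--         if count >= quantos_faltam:
--             return count
--         else:
--             return quantos_faltam
--     elif is_big:
--         return 6 - n
--     return count
-- ===== SOURCE B (Python) =====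
-- def minimumNumber(n, password):
--     # Return the minimum number of characters to make the password strong
--     numbers = "0123456789"
--     lower_case = "abcdefghijklmnopqrstuvwxyz"
--     upper_case = "ABCDEFGHIJKLMNOPQRSTUVWXYZ"
--     special_characters = "!@#$%^&*()-+"
--     s = set(password)
--     missing = sum(1 for cat in (numbers, lower_case, upper_case, special_characters)
--                   if s.isdisjoint(cat))
--     return max(missing, 6 - n, 0)
-- ===== Notes on version B (the rewrite author's own statement) =====
-- stated objective: simpler
-- what changed: Replaces the per-character counting dict and the four-way if/elif ladder with a one-pass set build, a sum of disjointness tests for the four categories, and a single max(missing, 6-n, 0) formula.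
import Mathlib
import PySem

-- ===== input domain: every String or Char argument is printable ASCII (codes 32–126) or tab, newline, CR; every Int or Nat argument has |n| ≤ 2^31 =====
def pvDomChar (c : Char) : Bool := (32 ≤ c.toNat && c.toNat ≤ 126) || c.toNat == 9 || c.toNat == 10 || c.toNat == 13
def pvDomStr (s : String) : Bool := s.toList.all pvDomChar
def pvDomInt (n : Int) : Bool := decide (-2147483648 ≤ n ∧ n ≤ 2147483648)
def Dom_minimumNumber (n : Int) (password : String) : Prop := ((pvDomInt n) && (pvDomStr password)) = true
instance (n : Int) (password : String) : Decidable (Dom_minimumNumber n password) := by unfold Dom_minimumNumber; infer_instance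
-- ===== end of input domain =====

-- B replaces A's per-character counting dict and if/elif ladder by a set of the
-- password, a sum of four disjointness tests, and one max(missing, 6-n, 0) formula (simpler).

-- ===== PORT A =====
-- the loop body of A: four independent membership tests, each bumping its dict entry.
-- result["k"] += 1 is ported as modify with default 0; the key is always present, so this is exact.
def pvStepA (r : PySem.Dict String Int) (p : Char) : PySem.Dict String Int :=
  let r := if "0123456789".toList.contains p then r.modify "numbers" 0 (· + 1) else r
  let r := if "abcdefghijklmnopqrstuvwxyz".toList.contains p then r.modify "lower_case" 0 (· + 1) else r
  let r := if "ABCDEFGHIJKLMNOPQRSTUVWXYZ".toList.contains p then r.modify "upper_case" 0 (· + 1) else r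
  if "!@#$%^&*()-+".toList.contains p then r.modify "special_characters" 0 (· + 1) else r

def minimumNumber (n : Int) (password : String) : Int :=
  let result := password.toList.foldl pvStepA
    (PySem.Dict.ofList [("numbers", 0), ("lower_case", 0), ("upper_case", 0), ("special_characters", 0)])
  let count : Int := 0
  let count := if result.getD "numbers" 0 = 0 then count + 1 else count
  let count := if result.getD "lower_case" 0 = 0 then count + 1 else count
  let count := if result.getD "upper_case" 0 = 0 then count + 1 else count
  let count := if result.getD "special_characters" 0 = 0 then count + 1 else count
  let isBig := n < 6
  if count = 0 ∧ isBig then 6 - n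
  else if count ≠ 0 ∧ isBig then
    let quantosFaltam := 6 - n
    if count ≥ quantosFaltam then count else quantosFaltam
  else if isBig then 6 - n
  else count

-- ===== PORT B =====
def minimumNumber_alt (n : Int) (password : String) : Int :=
  let s : PySem.Set Char := PySem.Set.ofList password.toList
  let missing : Int :=
    (["0123456789".toList, "abcdefghijklmnopqrstuvwxyz".toList,
      "ABCDEFGHIJKLMNOPQRSTUVWXYZ".toList, "!@#$%^&*()-+".toList].map
      (fun cat => if PySem.Set.isdisjoint s cat then (1 : Int) else 0)).sum
  max (max missing (6 - n)) 0

-- ===== PRECONDITION & SPEC =====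
def Spec_minimumNumber (n : Int) (password : String) (out : Int) : Prop := out = minimumNumber_alt n password
instance (n : Int) (password : String) (out : Int) : Decidable (Spec_minimumNumber n password out) := by unfold Spec_minimumNumber; infer_instance

-- ===== CLAIM (what is proved, stated in full; the proofs are below) =====
def Claim_equal_minimumNumber : Prop := ∀ (n : Int) (password : String), Dom_minimumNumber n password → Spec_minimumNumber n password (minimumNumber n password)

-- ===== LEMMAS AND PROOFS =====

-- A's dict entry after the fold = initial value + number of matching characters
theorem pvFold_getD (key : String) (pred : Char → Bool)
    (hstep : ∀ d p, (pvStepA d p).getD key 0 = d.getD key 0 + (if pred p then 1 else 0)) :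
    ∀ (l : List Char) (d : PySem.Dict String Int),
      (l.foldl pvStepA d).getD key 0 = d.getD key 0 + ((l.countP pred : Nat) : Int) := by
  intro l
  induction l with
  | nil => intro d; simp
  | cons p t ih =>
      intro d
      simp only [List.foldl_cons, ih, hstep, List.countP_cons]
      by_cases h : pred p = true <;> simp [h]
      ring

theorem pvStep_numbers (d : PySem.Dict String Int) (p : Char) :
    (pvStepA d p).getD "numbers" 0
      = d.getD "numbers" 0 + (if "0123456789".toList.contains p then 1 else 0) := by
  unfold pvStepA; split_ifs <;> simp [PySem.Dict.getD_modify]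

theorem pvStep_lower (d : PySem.Dict String Int) (p : Char) :
    (pvStepA d p).getD "lower_case" 0
      = d.getD "lower_case" 0 + (if "abcdefghijklmnopqrstuvwxyz".toList.contains p then 1 else 0) := by
  unfold pvStepA; split_ifs <;> simp [PySem.Dict.getD_modify]

theorem pvStep_upper (d : PySem.Dict String Int) (p : Char) :
    (pvStepA d p).getD "upper_case" 0
      = d.getD "upper_case" 0 + (if "ABCDEFGHIJKLMNOPQRSTUVWXYZ".toList.contains p then 1 else 0) := by
  unfold pvStepA; split_ifs <;> simp [PySem.Dict.getD_modify]

theorem pvStep_special (d : PySem.Dict String Int) (p : Char) :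
    (pvStepA d p).getD "special_characters" 0
      = d.getD "special_characters" 0 + (if "!@#$%^&*()-+".toList.contains p then 1 else 0) := by
  unfold pvStepA; split_ifs <;> simp [PySem.Dict.getD_modify]

-- B's disjointness test ⟺ A's count of that category is zero
theorem pvDisj_iff_count_zero (pw cat : List Char) :
    (PySem.Set.isdisjoint (PySem.Set.ofList pw) cat = true)
      ↔ pw.countP (fun p => cat.contains p) = 0 := by
  rw [PySem.Set.isdisjoint_iff, List.countP_eq_zero]
  simp [PySem.Set.mem_ofList]

-- ===== VERDICT (by name: the statement is the Claim_ definition above) =====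
theorem minimumNumber_spec : Claim_equal_minimumNumber := by
  intro n pw _
  unfold Spec_minimumNumber minimumNumber minimumNumber_alt
  simp only [List.map, List.sum_cons, List.sum_nil]
  rw [pvFold_getD _ _ pvStep_numbers, pvFold_getD _ _ pvStep_lower,
      pvFold_getD _ _ pvStep_upper, pvFold_getD _ _ pvStep_special]
  simp only [pvDisj_iff_count_zero]
  -- reduce the initial dict lookups (closed terms)
  simp only [show (PySem.Dict.ofList [("numbers", (0:Int)), ("lower_case", 0), ("upper_case", 0), ("special_characters", 0)]).getD "numbers" 0 = 0 from rfl,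
            show (PySem.Dict.ofList [("numbers", (0:Int)), ("lower_case", 0), ("upper_case", 0), ("special_characters", 0)]).getD "lower_case" 0 = 0 from rfl,
            show (PySem.Dict.ofList [("numbers", (0:Int)), ("lower_case", 0), ("upper_case", 0), ("special_characters", 0)]).getD "upper_case" 0 = 0 from rfl,
            show (PySem.Dict.ofList [("numbers", (0:Int)), ("lower_case", 0), ("upper_case", 0), ("special_characters", 0)]).getD "special_characters" 0 = 0 from rfl,
            zero_add, Nat.cast_eq_zero]
  split_ifs <;> omega
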